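-- pv_equiv track=rewrite | github.com/shivamyadav039/AI-Skill-Assessment | backend/app/agents/gap_analysis_agent.py | _create_recommended_focus
-- ===== SOURCE A (Python) =====
-- from typing import List, Dict, Optional
--
-- def _create_recommended_focus(
--
--     gaps: List[Dict],
--     strengths: List[str]
-- ) -> List[str]:
--     """
--     Create recommended focus areas based on gaps and strengths.
--
--     Args:
--         gaps: List of gap dictionaries (all levels combined)
--         strengths: List of strength skill names
--
--     Returns:
--         List of recommended focus areas
--     """
--     recommendations = []
--
--     # Sort gaps by priority
--     critical_skills = [g['skill'] for g in gaps if g['priority'] == 'CRITICAL']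
--     high_skills = [g['skill'] for g in gaps if g['priority'] == 'HIGH']
--
--     if critical_skills:
--         recommendations.append(
--             f"🔴 URGENT: Master {critical_skills[0]} first "
--             f"(foundational for {len(critical_skills)} critical gap(s))"
--         )
--
--     if high_skills:
--         recommendations.append(
--             f"🟠 HIGH PRIORITY: Improve {high_skills[0]} and related areas "
--             f"({len(high_skills)} high-priority skill(s))"
--         )
--
--     if strengths:
--         recommendations.append(
--             f"✅ LEVERAGE: Build on your {strengths[0]} expertise "
--             f"(strong in {len(strengths)} skill(s))"
--         )
--
--     return recommendations[:3]  # Top 3 recommendations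
-- ===== SOURCE B (Python) =====
-- def _create_recommended_focus(gaps, strengths):
--     # Table-driven: group gap skills into priority buckets (one dict pass), then
--     # emit recommendations by walking a plan table instead of hardcoded branches.
--     PLANS = [
--         ("CRITICAL", "\U0001F534 URGENT: Master ",
--          " first (foundational for ", " critical gap(s))"),
--         ("HIGH", "\U0001F7E0 HIGH PRIORITY: Improve ",
--          " and related areas (", " high-priority skill(s))"),
--     ]
--     wanted = {prio for prio, _, _, _ in PLANS}
--     buckets = {}
--     for g in gaps:
--         p = g['priority']
--         if p in wanted:
--             buckets[p] = buckets.get(p, []) + [g['skill']]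
--     recs = []
--     for prio, pre, mid, suf in PLANS:
--         bucket = buckets.get(prio, [])
--         if bucket:
--             recs.append(pre + bucket[0] + mid + str(len(bucket)) + suf)
--     if strengths:
--         recs.append("\u2705 LEVERAGE: Build on your " + strengths[0] +
--                     " expertise (strong in " + str(len(strengths)) + " skill(s))")
--     return recs[:3]
-- ===== Notes on version B (the rewrite author's own statement) =====
-- stated objective: alternative
-- what changed: Replaces A's two priority-specific list comprehensions and hardcoded if-branches with a generic grouping pass that collects skills into a dict of priority buckets, followed by table-driven emission: a loop over a plan table (priority, message pieces) that builds each recommendation from its bucket.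
import Mathlib
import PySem

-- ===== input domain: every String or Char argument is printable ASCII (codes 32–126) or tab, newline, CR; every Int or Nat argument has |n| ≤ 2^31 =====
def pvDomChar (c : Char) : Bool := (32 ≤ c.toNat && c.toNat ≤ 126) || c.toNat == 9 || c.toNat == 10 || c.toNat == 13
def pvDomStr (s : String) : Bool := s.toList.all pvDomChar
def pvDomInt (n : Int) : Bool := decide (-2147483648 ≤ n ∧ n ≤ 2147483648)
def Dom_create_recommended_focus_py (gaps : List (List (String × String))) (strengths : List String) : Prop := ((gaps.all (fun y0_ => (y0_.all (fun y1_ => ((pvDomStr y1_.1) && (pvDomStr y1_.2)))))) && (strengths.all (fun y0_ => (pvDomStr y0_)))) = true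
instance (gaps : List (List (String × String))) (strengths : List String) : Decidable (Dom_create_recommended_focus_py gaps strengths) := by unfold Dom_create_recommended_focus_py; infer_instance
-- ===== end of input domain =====

-- B replaces A's two priority-specific comprehensions and hardcoded branches by a generic
-- dict-of-buckets grouping pass plus table-driven emission (objective: alternative).


-- shared transliteration of the Python subscript g[k] (Pre_ guarantees the key is present)
def pvItem (g : List (String × String)) (k : String) : String :=
  ((PySem.Dict.mk g).get? k).getD ""

-- ===== PORT A =====
def create_recommended_focus_py (gaps : List (List (String × String))) (strengths : List String) : List String :=
  let critical_skills :=
    (gaps.filter (fun g => pvItem g "priority" == "CRITICAL")).map (fun g => pvItem g "skill")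
  let high_skills :=
    (gaps.filter (fun g => pvItem g "priority" == "HIGH")).map (fun g => pvItem g "skill")
  let recommendations : List String := []
  let recommendations :=
    if critical_skills ≠ [] then
      recommendations ++ ["🔴 URGENT: Master " ++ ((PySem.List.pyGet? critical_skills 0).getD "") ++
        " first (foundational for " ++ PySem.Int.toStr (critical_skills.length : Int) ++ " critical gap(s))"]
    else recommendations
  let recommendations :=
    if high_skills ≠ [] then
      recommendations ++ ["🟠 HIGH PRIORITY: Improve " ++ ((PySem.List.pyGet? high_skills 0).getD "") ++
        " and related areas (" ++ PySem.Int.toStr (high_skills.length : Int) ++ " high-priority skill(s))"]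
    else recommendations
  let recommendations :=
    if strengths ≠ [] then
      recommendations ++ ["✅ LEVERAGE: Build on your " ++ ((PySem.List.pyGet? strengths 0).getD "") ++
        " expertise (strong in " ++ PySem.Int.toStr (strengths.length : Int) ++ " skill(s))"]
    else recommendations
  recommendations.take 3

-- ===== PORT B =====
-- Source B's PLANS table: (priority, prefix, middle, suffix)
def pvPlans : List (String × String × String × String) :=
  [("CRITICAL", "🔴 URGENT: Master ", " first (foundational for ", " critical gap(s))"),
   ("HIGH", "🟠 HIGH PRIORITY: Improve ", " and related areas (", " high-priority skill(s))")]

-- Source B's `wanted` set (a Python set literal of the plan priorities)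
def pvWanted : List String := PySem.Set.ofList (pvPlans.map (fun pl => pl.1))

-- Source B's grouping loop: buckets[p] = buckets.get(p, []) + [g['skill']] for wanted priorities
def pvBuckets (gaps : List (List (String × String))) : PySem.Dict String (List String) :=
  gaps.foldl
    (fun d g =>
      let p := pvItem g "priority"
      if pvWanted.contains p then d.insert p (d.getD p [] ++ [pvItem g "skill"]) else d)
    PySem.Dict.empty

def create_recommended_focus_py_alt (gaps : List (List (String × String))) (strengths : List String) : List String :=
  let buckets := pvBuckets gaps
  let recs :=
    pvPlans.foldl
      (fun acc pl =>
        match buckets.getD pl.1 [] with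
        | [] => acc
        | s :: r =>
          acc ++ [pl.2.1 ++ s ++ pl.2.2.1 ++ PySem.Int.toStr (((s :: r).length : Nat) : Int) ++ pl.2.2.2])
      []
  let recs :=
    if strengths ≠ [] then
      recs ++ ["✅ LEVERAGE: Build on your " ++ ((PySem.List.pyGet? strengths 0).getD "") ++
        " expertise (strong in " ++ PySem.Int.toStr (strengths.length : Int) ++ " skill(s))"]
    else recs
  recs.take 3

-- ===== PRECONDITION & SPEC =====
-- Pre_ excludes exactly the inputs on which the Python A raises KeyError: a gap without a
-- 'priority' key, or a CRITICAL/HIGH gap without a 'skill' key.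
def Pre_create_recommended_focus_py (gaps : List (List (String × String))) (strengths : List String) : Prop :=
  ∀ g ∈ gaps, ((PySem.Dict.mk g).get? "priority").isSome = true ∧
    (((PySem.Dict.mk g).get? "priority" = some "CRITICAL" ∨ (PySem.Dict.mk g).get? "priority" = some "HIGH") →
      ((PySem.Dict.mk g).get? "skill").isSome = true)
instance (gaps : List (List (String × String))) (strengths : List String) : Decidable (Pre_create_recommended_focus_py gaps strengths) := by unfold Pre_create_recommended_focus_py; infer_instance
def pvWitness_create_recommended_focus_py : (List (List (String × String))) × List String :=
  ([[("priority", "CRITICAL"), ("skill", "python")], [("priority", "LOW")]], ["sql"])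

def Spec_create_recommended_focus_py (gaps : List (List (String × String))) (strengths : List String) (out : List String) : Prop := out = create_recommended_focus_py_alt gaps strengths
instance (gaps : List (List (String × String))) (strengths : List String) (out : List String) : Decidable (Spec_create_recommended_focus_py gaps strengths out) := by unfold Spec_create_recommended_focus_py; infer_instance

-- ===== CLAIM (what is proved, stated in full; the proofs are below) =====
def Claim_equal_create_recommended_focus_py : Prop := ∀ (gaps : List (List (String × String))) (strengths : List String), Dom_create_recommended_focus_py gaps strengths → Pre_create_recommended_focus_py gaps strengths → Spec_create_recommended_focus_py gaps strengths (create_recommended_focus_py gaps strengths)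

-- ===== LEMMAS AND PROOFS =====

-- the grouping loop's bucket at a wanted key k is exactly A's "filter by k, map skill" list
theorem pvBuckets_getD (gaps : List (List (String × String))) (d : PySem.Dict String (List String))
    (k : String) (hk : pvWanted.contains k = true) :
    (gaps.foldl
      (fun d g =>
        let p := pvItem g "priority"
        if pvWanted.contains p then d.insert p (d.getD p [] ++ [pvItem g "skill"]) else d)
      d).getD k []
    = d.getD k [] ++ (gaps.filter (fun g => pvItem g "priority" == k)).map (fun g => pvItem g "skill") := by
  induction gaps generalizing d with
  | nil => simp
  | cons g rest ih =>
    simp only [List.foldl_cons, List.filter_cons]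
    by_cases hpk : pvItem g "priority" = k
    · rw [hpk, if_pos hk, ih _]
      simp
    · have hbeq : (pvItem g "priority" == k) = false := by
        simp [hpk]
      rw [hbeq]
      by_cases hw : pvWanted.contains (pvItem g "priority") = true
      · simp only [if_pos hw]
        rw [ih _]
        rw [PySem.Dict.getD_insert]
        simp [Ne.symm hpk]
      · simp only [Bool.not_eq_true] at hw
        simp only [hw, Bool.false_eq_true, if_false]
        exact ih _

-- ===== VERDICT (by name: the statement is the Claim_ definition above) =====
theorem create_recommended_focus_py_spec : Claim_equal_create_recommended_focus_py := by
  intro gaps strengths _ _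
  unfold Spec_create_recommended_focus_py
  unfold create_recommended_focus_py create_recommended_focus_py_alt pvBuckets
  have hc := pvBuckets_getD gaps PySem.Dict.empty "CRITICAL" (by decide)
  have hh := pvBuckets_getD gaps PySem.Dict.empty "HIGH" (by decide)
  simp only [PySem.Dict.getD_empty, List.nil_append] at hc hh
  simp only [pvPlans, List.foldl_cons, List.foldl_nil]
  rw [hc, hh]
  set c := (gaps.filter (fun g => pvItem g "priority" == "CRITICAL")).map (fun g => pvItem g "skill") with hcdef
  set h := (gaps.filter (fun g => pvItem g "priority" == "HIGH")).map (fun g => pvItem g "skill") with hhdef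
  cases c <;> cases h <;>
    simp [PySem.List.pyGet?, PySem.List.pyIdx?]
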